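-- pv_equiv track=rewrite | github.com/dhdelaharpe/imageProcessing | task1.py | groupPixels
-- ===== SOURCE A (Python) =====
-- def groupPixels(image):
--     out = []
--     pixel=[]
--     count=-1
--     for i in range(0,len(image)):
--         count+=1
--         pixel.append(image[i].strip("\n"))
--         if(count==2):
--             out.append(pixel)
--             pixel=[]
--             count=-1
--     return out
-- ===== SOURCE B (Python) =====
-- def groupPixels(image):
--     stripped = [line.strip("\n") for line in image]
--     return [stripped[i:i + 3] for i in range(0, len(stripped) - 2, 3)]
-- ===== Notes on version B (the rewrite author's own statement) =====
-- stated objective: idiomatic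
-- what changed: Replaces the per-element counter/accumulator loop by stripping all lines once and slicing the list at chunk-start indices range(0, len-2, 3), which drops an incomplete tail exactly like A.
import Mathlib
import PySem

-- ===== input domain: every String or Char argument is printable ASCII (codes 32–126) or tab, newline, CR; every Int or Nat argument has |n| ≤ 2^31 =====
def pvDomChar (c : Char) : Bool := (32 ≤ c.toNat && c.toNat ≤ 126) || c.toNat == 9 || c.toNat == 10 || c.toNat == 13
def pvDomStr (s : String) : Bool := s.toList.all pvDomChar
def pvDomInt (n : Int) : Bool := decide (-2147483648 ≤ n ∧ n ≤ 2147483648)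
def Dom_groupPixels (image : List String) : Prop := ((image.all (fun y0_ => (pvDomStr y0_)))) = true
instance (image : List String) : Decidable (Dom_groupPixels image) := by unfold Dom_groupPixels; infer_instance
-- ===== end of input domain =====

-- B groups the newline-stripped lines into triples by slicing at chunk-start indices
-- instead of A's per-element counter/accumulator loop; objective: more idiomatic, same cost.

-- ===== PORT A =====
-- loop body of A: strip the line, append to the current pixel, flush every third line
def stepA (st : List (List String) × List String × Int) (x : String) :
    List (List String) × List String × Int :=
  let count := st.2.2 + 1
  let pixel := st.2.1 ++ [PySem.Str.stripChars x "\n"]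
  if count == 2 then (st.1 ++ [pixel], ([] : List String), (-1 : Int))
  else (st.1, pixel, count)

def groupPixels (image : List String) : List (List String) :=
  ((PySem.List.pyRange 0 (PySem.List.len image) 1).foldl
      (fun st i => stepA st (PySem.List.pyGetD image i ""))
      (([] : List (List String)), ([] : List String), (-1 : Int))).1

-- ===== PORT B =====
def groupPixels_alt (image : List String) : List (List String) :=
  let stripped := image.map (fun line => PySem.Str.stripChars line "\n")
  (PySem.List.pyRange 0 (PySem.List.len stripped - 2) 3).map
    (fun i => PySem.List.slice stripped (some i) (some (i + 3)))

-- ===== PRECONDITION & SPEC =====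
def Spec_groupPixels (image : List String) (out : List (List String)) : Prop := out = groupPixels_alt image
instance (image : List String) (out : List (List String)) : Decidable (Spec_groupPixels image out) := by unfold Spec_groupPixels; infer_instance

-- ===== CLAIM (what is proved, stated in full; the proofs are below) =====
def Claim_equal_groupPixels : Prop := ∀ (image : List String), Dom_groupPixels image → Spec_groupPixels image (groupPixels image)

-- ===== LEMMAS AND PROOFS =====

/-- the common value: complete triples of a list, incomplete tail dropped -/
def chunk3 : List String → List (List String)
  | [] => []
  | [_] => []
  | [_, _] => []
  | a :: b :: c :: t => [a, b, c] :: chunk3 t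

lemma foldA (s : List String) (out : List (List String)) :
    (s.foldl stepA (out, ([] : List String), (-1 : Int))).1
      = out ++ chunk3 (s.map (fun x => PySem.Str.stripChars x "\n")) := by
  induction s using chunk3.induct generalizing out with
  | case1 => simp [chunk3]
  | case2 a => simp [chunk3, stepA]
  | case3 a b => simp [chunk3, stepA]
  | case4 a b c t ih =>
    simp only [List.foldl_cons, List.map_cons, chunk3, stepA]
    norm_num
    rw [ih]
    simp

lemma drop3 (a b c : String) (t : List String) (k : Nat) :
    (a :: b :: c :: t).drop (3 * (k + 1)) = t.drop (3 * k) := by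
  have h : 3 * (k + 1) = ((3 * k) + 1) + 1 + 1 := by ring
  rw [h]
  simp [List.drop_succ_cons]

lemma rangeMap (s : List String) :
    (List.range (s.length / 3)).map (fun k => (s.drop (3 * k)).take 3) = chunk3 s := by
  induction s using chunk3.induct with
  | case1 => simp [chunk3]
  | case2 a => simp [chunk3]
  | case3 a b => simp [chunk3]
  | case4 a b c t ih =>
    have hlen : (a :: b :: c :: t).length / 3 = t.length / 3 + 1 := by
      simp [List.length_cons]; omega
    rw [hlen, List.range_succ_eq_map, List.map_cons, List.map_map]
    simp only [Function.comp_def, chunk3]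
    refine List.cons_eq_cons.mpr ⟨by simp, ?_⟩
    rw [← ih]
    apply List.map_congr_left
    intro k _
    rw [show Nat.succ k = k + 1 from rfl, drop3]

lemma sliceB (s : List String) :
    (PySem.List.pyRange 0 (PySem.List.len s - 2) 3).map
        (fun i => PySem.List.slice s (some i) (some (i + 3))) = chunk3 s := by
  rw [PySem.List.pyRange_of_pos _ _ (by norm_num : (0:Int) < 3), PySem.List.len_eq]
  have hm : (if (0:Int) < (s.length : Int) - 2 then
      (((s.length : Int) - 2 - 0 + 3 - 1) / 3).toNat else 0) = s.length / 3 := by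
    rw [show (s.length : Int) - 2 - 0 + 3 - 1 = (s.length : Int) from by ring]
    split
    · rw [show ((3:Int) = ((3:Nat):Int)) from rfl, ← Int.natCast_div, Int.toNat_natCast]
    · omega
  rw [hm, ← rangeMap, List.map_map]
  apply List.map_congr_left
  intro k _
  simp only [Function.comp_def]
  rw [PySem.List.slice_toNat s (by positivity) (by positivity)]
  rw [show (0 + 3 * (k:Int)).toNat = 3 * k from by omega,
    show (0 + 3 * (k:Int) + 3).toNat = 3 * k + 3 from by omega,
    show 3 * k + 3 - 3 * k = 3 from by omega]

-- ===== VERDICT (by name: the statement is the Claim_ definition above) =====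
theorem groupPixels_spec : Claim_equal_groupPixels := by
  intro image _
  unfold Spec_groupPixels groupPixels groupPixels_alt
  rw [PySem.List.foldl_pyRange_zero_pyGetD image "" stepA
      (([] : List (List String)), ([] : List String), (-1 : Int))]
  rw [foldA, List.nil_append]
  simp only [PySem.List.len_eq, List.length_map]
  rw [← sliceB (image.map (fun line => PySem.Str.stripChars line "\n")), PySem.List.len_eq,
    List.length_map]
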